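-- pv_equiv track=rewrite | github.com/Wes-Thomas-1995/ALFRED-AI | 1__REPORT_AUTOMATION/XML_PROJECT/PROJECT_PART_1/__XML__.py | GROUP_NESTED_OUTPUT_BY_STRUCTURE
-- ===== SOURCE A (Python) =====
-- def GROUP_NESTED_OUTPUT_BY_STRUCTURE(NESTED_OUTPUT):
--     CLUSTERS = {}
--
--     for SHEET_NAME, CELLS in NESTED_OUTPUT.items():
--         FORM_CLUSTERS = {}
--
--         for CELL, CELL_DATA in CELLS.items():
--             NESTED_STRING = CELL_DATA.get('NESTED_STRING', 'NO_NESTED_STRING')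
--             if NESTED_STRING not in FORM_CLUSTERS:
--                 FORM_CLUSTERS[NESTED_STRING] = []
--             FORM_CLUSTERS[NESTED_STRING].append(CELL)
--
--         CLUSTERS[SHEET_NAME] = FORM_CLUSTERS
--
--     return CLUSTERS
-- ===== SOURCE B (Python) =====
-- def GROUP_NESTED_OUTPUT_BY_STRUCTURE(NESTED_OUTPUT):
--     CLUSTERS = {}
--     for SHEET_NAME, CELLS in NESTED_OUTPUT.items():
--         ORDER = list(dict.fromkeys(
--             CELL_DATA.get('NESTED_STRING', 'NO_NESTED_STRING')
--             for CELL_DATA in CELLS.values()))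
--         CLUSTERS[SHEET_NAME] = {
--             K: [CELL for CELL, CELL_DATA in CELLS.items()
--                 if CELL_DATA.get('NESTED_STRING', 'NO_NESTED_STRING') == K]
--             for K in ORDER}
--     return CLUSTERS
-- ===== Notes on version B (the rewrite author's own statement) =====
-- stated objective: alternative
-- what changed: Replaces the incremental bucket-dict (create-empty-then-append per cell) with a two-phase pass per sheet: dedup the NESTED_STRING keys in first-occurrence order, then build each group by filtering the cells for that key.
import Mathlib
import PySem

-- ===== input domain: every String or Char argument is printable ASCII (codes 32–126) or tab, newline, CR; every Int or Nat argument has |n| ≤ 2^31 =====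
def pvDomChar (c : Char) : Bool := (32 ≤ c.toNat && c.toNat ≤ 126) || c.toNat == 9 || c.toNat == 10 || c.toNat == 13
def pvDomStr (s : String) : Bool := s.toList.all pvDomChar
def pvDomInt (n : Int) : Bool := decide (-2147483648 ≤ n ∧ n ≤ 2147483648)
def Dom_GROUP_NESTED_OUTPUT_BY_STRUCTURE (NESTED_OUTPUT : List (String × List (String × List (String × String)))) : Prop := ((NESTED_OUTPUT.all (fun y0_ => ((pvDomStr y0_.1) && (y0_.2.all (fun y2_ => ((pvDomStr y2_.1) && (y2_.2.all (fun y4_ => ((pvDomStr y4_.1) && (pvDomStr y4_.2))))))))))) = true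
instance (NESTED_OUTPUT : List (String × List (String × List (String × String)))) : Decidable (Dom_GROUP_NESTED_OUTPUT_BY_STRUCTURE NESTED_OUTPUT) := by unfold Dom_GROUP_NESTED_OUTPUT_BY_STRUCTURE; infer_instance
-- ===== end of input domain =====

-- B groups each sheet by dedup-the-keys-then-filter-per-key instead of A's incremental
-- bucket dict; same values, objective: alternative decomposition (not faster).

-- ===== PORT A =====
-- CELL_DATA.get('NESTED_STRING', 'NO_NESTED_STRING')
def pvKey (cd : List (String × String)) : String :=
  (PySem.Dict.mk cd).getD "NESTED_STRING" "NO_NESTED_STRING"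

-- A's inner loop building FORM_CLUSTERS for one sheet
def pvFormClustersA (CELLS : List (String × List (String × String))) : PySem.Dict String (List String) :=
  CELLS.foldl (fun FORM_CLUSTERS c =>
      let NESTED_STRING := pvKey c.2
      -- if NESTED_STRING not in FORM_CLUSTERS: FORM_CLUSTERS[NESTED_STRING] = []
      let FORM_CLUSTERS :=
        if FORM_CLUSTERS.contains NESTED_STRING then FORM_CLUSTERS
        else FORM_CLUSTERS.insert NESTED_STRING ([] : List String)
      -- FORM_CLUSTERS[NESTED_STRING].append(CELL)
      FORM_CLUSTERS.insert NESTED_STRING (FORM_CLUSTERS.getD NESTED_STRING [] ++ [c.1]))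
    PySem.Dict.empty

def GROUP_NESTED_OUTPUT_BY_STRUCTURE (NESTED_OUTPUT : List (String × List (String × List (String × String)))) : List (String × List (String × List String)) :=
  ((NESTED_OUTPUT.foldl (fun CLUSTERS s => CLUSTERS.insert s.1 (pvFormClustersA s.2))
    (PySem.Dict.empty : PySem.Dict String (PySem.Dict String (List String)))).items).map
    (fun p => (p.1, p.2.items))

-- ===== PORT B =====
-- B's per-sheet grouping: dedup the keys in first-occurrence order, then filter per key
def pvFormClustersB (CELLS : List (String × List (String × String))) : List (String × List String) :=
  let ORDER := PySem.List.dedup (CELLS.map (fun c => pvKey c.2))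
  ORDER.map (fun K => (K, (CELLS.filter (fun c => pvKey c.2 == K)).map (·.1)))

def GROUP_NESTED_OUTPUT_BY_STRUCTURE_alt (NESTED_OUTPUT : List (String × List (String × List (String × String)))) : List (String × List (String × List String)) :=
  (NESTED_OUTPUT.foldl (fun CLUSTERS s => CLUSTERS.insert s.1 (pvFormClustersB s.2))
    (PySem.Dict.empty : PySem.Dict String (List (String × List String)))).items

-- ===== PRECONDITION & SPEC =====
def Spec_GROUP_NESTED_OUTPUT_BY_STRUCTURE (NESTED_OUTPUT : List (String × List (String × List (String × String)))) (out : List (String × List (String × List String))) : Prop := out = GROUP_NESTED_OUTPUT_BY_STRUCTURE_alt NESTED_OUTPUT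
instance (NESTED_OUTPUT : List (String × List (String × List (String × String)))) (out : List (String × List (String × List String))) : Decidable (Spec_GROUP_NESTED_OUTPUT_BY_STRUCTURE NESTED_OUTPUT out) := by unfold Spec_GROUP_NESTED_OUTPUT_BY_STRUCTURE; infer_instance

-- ===== CLAIM (what is proved, stated in full; the proofs are below) =====
def Claim_equal_GROUP_NESTED_OUTPUT_BY_STRUCTURE : Prop := ∀ (NESTED_OUTPUT : List (String × List (String × List (String × String)))), Dom_GROUP_NESTED_OUTPUT_BY_STRUCTURE NESTED_OUTPUT → Spec_GROUP_NESTED_OUTPUT_BY_STRUCTURE NESTED_OUTPUT (GROUP_NESTED_OUTPUT_BY_STRUCTURE NESTED_OUTPUT)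

-- ===== LEMMAS AND PROOFS =====

-- A's per-cell step (create-empty-then-append) is Python's d.modify (append-to-default)
theorem pv_stepA_eq_modify (F : PySem.Dict String (List String)) (k : String) (x : String) :
    (let F' := if F.contains k then F else F.insert k ([] : List String);
     F'.insert k (F'.getD k [] ++ [x])) = F.modify k [] (· ++ [x]) := by
  by_cases h : F.contains k = true
  · simp only [h, if_pos]
    simp [PySem.Dict.modify]
  · simp only [h, if_neg, Bool.not_eq_true]
    rw [PySem.Dict.getD_insert_self, PySem.Dict.insert_insert_self]
    simp [PySem.Dict.modify, PySem.Dict.getD_of_not_contains F [] (by simpa using h)]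

-- A's inner loop, taken as items, is exactly B's dedup-then-filter grouping
theorem pv_inner_eq (CELLS : List (String × List (String × String))) :
    (pvFormClustersA CELLS).items = pvFormClustersB CELLS := by
  have hstep : pvFormClustersA CELLS
      = CELLS.foldl (fun d c => d.modify (pvKey c.2) [] (· ++ [c.1])) PySem.Dict.empty := by
    unfold pvFormClustersA
    have : (fun (FORM_CLUSTERS : PySem.Dict String (List String)) (c : String × List (String × String)) =>
        let NESTED_STRING := pvKey c.2
        let FORM_CLUSTERS :=
          if FORM_CLUSTERS.contains NESTED_STRING then FORM_CLUSTERS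
          else FORM_CLUSTERS.insert NESTED_STRING ([] : List String)
        FORM_CLUSTERS.insert NESTED_STRING (FORM_CLUSTERS.getD NESTED_STRING [] ++ [c.1]))
        = (fun d c => d.modify (pvKey c.2) [] (· ++ [c.1])) := by
      funext d c
      exact pv_stepA_eq_modify d (pvKey c.2) c.1
    rw [this]
  rw [hstep]
  set D := CELLS.foldl (fun d c => d.modify (pvKey c.2) [] (· ++ [c.1]))
    (PySem.Dict.empty : PySem.Dict String (List String)) with hD
  have hnodup : D.keys.Nodup :=
    PySem.Dict.nodup_keys_foldl_modify_key CELLS (fun c => pvKey c.2) []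
      (fun _ c => (· ++ [c.1])) _ PySem.Dict.nodup_keys_empty
  rw [PySem.Dict.items_eq_map_keys D hnodup []]
  have hkeys : D.keys = PySem.List.dedup (CELLS.map (fun c => pvKey c.2)) := by
    rw [hD, PySem.Dict.keys_foldl_modify_key CELLS (fun c => pvKey c.2) [] (fun _ c => (· ++ [c.1]))]
    rw [PySem.List.dedup_eq_ofList]
    simp [PySem.Set.update, PySem.Set.ofList, PySem.Dict.keys_empty]
  rw [hkeys]
  unfold pvFormClustersB
  apply List.map_congr_left
  intro K _
  have hget : D.getD K [] = ((CELLS.map (fun c => (pvKey c.2, c.1))).filter (fun p => p.1 == K)).map (·.2) := by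
    rw [hD]
    rw [show (CELLS.foldl (fun d c => d.modify (pvKey c.2) [] (· ++ [c.1]))
          (PySem.Dict.empty : PySem.Dict String (List String)))
        = ((CELLS.map (fun c => (pvKey c.2, c.1))).foldl
            (fun d p => d.modify p.1 [] (· ++ [p.2])) PySem.Dict.empty)
      by rw [List.foldl_map]]
    rw [PySem.Dict.getD_foldl_modify_append]
    simp [PySem.Dict.getD_empty]
  rw [hget, List.filter_map, List.map_map]
  rfl

-- the outer loops, related by "A's values, taken as items, are B's values"
theorem pv_outer (L : List (String × List (String × List (String × String))))
    (dA : PySem.Dict String (PySem.Dict String (List String)))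
    (dB : PySem.Dict String (List (String × List String)))
    (h : dA.items.map (fun p => (p.1, p.2.items)) = dB.items) :
    ((L.foldl (fun CLUSTERS s => CLUSTERS.insert s.1 (pvFormClustersA s.2)) dA).items).map
        (fun p => (p.1, p.2.items))
    = (L.foldl (fun CLUSTERS s => CLUSTERS.insert s.1 (pvFormClustersB s.2)) dB).items := by
  induction L generalizing dA dB with
  | nil => simpa using h
  | cons s L ih =>
      simp only [List.foldl_cons]
      apply ih
      have hkeys : dA.keys = dB.keys := by
        have := congrArg (List.map Prod.fst) h
        simpa [PySem.Dict.keys, List.map_map, Function.comp] using this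
      have hcont : dA.contains s.1 = dB.contains s.1 := by
        rw [PySem.Dict.contains_eq_decide_mem_keys, PySem.Dict.contains_eq_decide_mem_keys, hkeys]
      rw [PySem.Dict.items_insert, PySem.Dict.items_insert, hcont]
      by_cases hc : dB.contains s.1 = true
      · simp only [hc, if_pos, List.map_map, ← h, List.map_map]
        apply List.map_congr_left
        intro p _
        by_cases hp : (p.1 == s.1) = true
        · simp [Function.comp, hp, pv_inner_eq]
        · simp [Function.comp, hp]
      · simp only [hc, if_neg, Bool.not_eq_true, List.map_append, h]
        simp [pv_inner_eq]

-- ===== VERDICT (by name: the statement is the Claim_ definition above) =====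
theorem GROUP_NESTED_OUTPUT_BY_STRUCTURE_spec : Claim_equal_GROUP_NESTED_OUTPUT_BY_STRUCTURE := by
  intro NESTED_OUTPUT _
  unfold Spec_GROUP_NESTED_OUTPUT_BY_STRUCTURE
  unfold GROUP_NESTED_OUTPUT_BY_STRUCTURE GROUP_NESTED_OUTPUT_BY_STRUCTURE_alt
  exact pv_outer NESTED_OUTPUT PySem.Dict.empty PySem.Dict.empty (by simp [PySem.Dict.empty])
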